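-- pv_equiv track=rewrite | github.com/pawklopper/thesis-code- | src/analyse_data_rl.py | _choose_tag
-- ===== SOURCE A (Python) =====
-- def _choose_tag(available_tags: list[str], kind: str) -> str | None:
--     aset = set(available_tags)
--     if kind == "critic_loss":
--         for t in ["train/critic_loss", "critic_loss", "loss/critic"]:
--             if t in aset:
--                 return t
--         for t in available_tags:
--             if "critic_loss" in t.lower():
--                 return t
--         for t in available_tags:
--             low = t.lower()
--             if "critic" in low and "loss" in low:
--                 return t
--         return None
--     if kind == "entropy":
--         for t in ["train/entropy", "entropy"]:
--             if t in aset: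
--                 return t
--         for t in available_tags:
--             low = t.lower()
--             if "entropy" in low:
--                 return t
--         return None
--     if kind == "reward":
--         for t in ["reward/episode_mean", "rollout/ep_rew_mean", "episode_reward_mean"]:
--             if t in aset:
--                 return t
--         for t in available_tags:
--             low = t.lower()
--             if "rew" in low and "mean" in low:
--                 return t
--         return None
--     if kind == "ent_coef":
--         for t in ["train/ent_coef", "ent_coef"]:
--             if t in aset:
--                 return t
--         for t in available_tags:
--             if "ent_coef" in t.lower():
--                 return t
--         return None
--     if kind == "actor_loss":
--         for t in ["train/actor_loss", "actor_loss", "loss/actor"]: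
--             if t in aset:
--                 return t
--         for t in available_tags:
--             low = t.lower()
--             if "actor" in low and "loss" in low:
--                 return t
--         return None
--     return None
-- ===== SOURCE B (Python) =====
-- _SPECS = {
--     "critic_loss": (["train/critic_loss", "critic_loss", "loss/critic"],
--                     [["critic_loss"], ["critic", "loss"]]),
--     "entropy": (["train/entropy", "entropy"], [["entropy"]]),
--     "reward": (["reward/episode_mean", "rollout/ep_rew_mean", "episode_reward_mean"],
--                [["rew", "mean"]]),
--     "ent_coef": (["train/ent_coef", "ent_coef"], [["ent_coef"]]),
--     "actor_loss": (["train/actor_loss", "actor_loss", "loss/actor"],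
--                    [["actor", "loss"]]),
-- }
--
--
-- def _rank(exacts, tiers, t):
--     # priority of a tag: its position in the exact-name list, else
--     # len(exacts) + index of the first substring tier it satisfies, else None
--     for j, e in enumerate(exacts):
--         if t == e:
--             return j
--     low = t.lower()
--     for j, subs in enumerate(tiers):
--         if all(s in low for s in subs):
--             return len(exacts) + j
--     return None
--
-- def _choose_tag(available_tags: list[str], kind: str) -> str | None:
--     spec = _SPECS.get(kind)
--     if spec is None:
--         return None
--     exacts, tiers = spec
--     best = None  # (rank, index, tag) minimal in lexicographic (rank, index)
--     for i, t in enumerate(available_tags):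
--         r = _rank(exacts, tiers, t)
--         if r is not None and (best is None or (r, i) < (best[0], best[1])):
--             best = (r, i, t)
--     return best[2] if best is not None else None
-- ===== Notes on version B (the rewrite author's own statement) =====
-- stated objective: alternative
-- what changed: Instead of A's staged searches (exact-name set probes, then one scan of the tags per substring tier), B assigns every tag a single numeric priority rank (position in the exact list, else exact-count + first matching substring tier) and does ONE pass over available_tags keeping the argmin of (rank, index); the spec data per kind lives in a table.
import Mathlib
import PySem

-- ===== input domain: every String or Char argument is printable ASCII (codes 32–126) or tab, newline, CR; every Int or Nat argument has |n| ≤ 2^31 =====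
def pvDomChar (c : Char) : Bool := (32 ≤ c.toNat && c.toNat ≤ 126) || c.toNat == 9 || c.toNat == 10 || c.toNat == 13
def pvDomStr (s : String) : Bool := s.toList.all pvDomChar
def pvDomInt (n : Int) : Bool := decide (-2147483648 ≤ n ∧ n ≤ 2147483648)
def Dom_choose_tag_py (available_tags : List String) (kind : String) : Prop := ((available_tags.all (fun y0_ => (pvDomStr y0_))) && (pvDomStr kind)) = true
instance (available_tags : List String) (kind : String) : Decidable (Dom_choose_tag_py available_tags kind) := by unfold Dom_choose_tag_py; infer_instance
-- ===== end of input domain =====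

-- B replaces A's staged searches (exact-name probes, then per-tier scans) by a single pass over
-- available_tags keeping the argmin of a per-tag priority (rank, index); same return value (objective: alternative).

-- ===== PORT A =====
-- Port of A: five hardcoded kind branches; each 'for … return' loop ported as List.find?.
def choose_tag_py (available_tags : List String) (kind : String) : Option String :=
  let aset : PySem.Set String := PySem.Set.ofList available_tags
  if kind == "critic_loss" then
    match (["train/critic_loss", "critic_loss", "loss/critic"]).find? (fun t => PySem.Set.contains aset t) with
    | some t => some t
    | none =>
      match available_tags.find? (fun t => PySem.Str.isIn "critic_loss" (PySem.Str.lower t)) with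
      | some t => some t
      | none =>
        match available_tags.find? (fun t =>
            let low := PySem.Str.lower t
            PySem.Str.isIn "critic" low && PySem.Str.isIn "loss" low) with
        | some t => some t
        | none => none
  else if kind == "entropy" then
    match (["train/entropy", "entropy"]).find? (fun t => PySem.Set.contains aset t) with
    | some t => some t
    | none =>
      match available_tags.find? (fun t =>
          let low := PySem.Str.lower t
          PySem.Str.isIn "entropy" low) with
      | some t => some t
      | none => none
  else if kind == "reward" then
    match (["reward/episode_mean", "rollout/ep_rew_mean", "episode_reward_mean"]).find? (fun t => PySem.Set.contains aset t) with
    | some t => some t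
    | none =>
      match available_tags.find? (fun t =>
          let low := PySem.Str.lower t
          PySem.Str.isIn "rew" low && PySem.Str.isIn "mean" low) with
      | some t => some t
      | none => none
  else if kind == "ent_coef" then
    match (["train/ent_coef", "ent_coef"]).find? (fun t => PySem.Set.contains aset t) with
    | some t => some t
    | none =>
      match available_tags.find? (fun t => PySem.Str.isIn "ent_coef" (PySem.Str.lower t)) with
      | some t => some t
      | none => none
  else if kind == "actor_loss" then
    match (["train/actor_loss", "actor_loss", "loss/actor"]).find? (fun t => PySem.Set.contains aset t) with
    | some t => some t
    | none =>
      match available_tags.find? (fun t =>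
          let low := PySem.Str.lower t
          PySem.Str.isIn "actor" low && PySem.Str.isIn "loss" low) with
      | some t => some t
      | none => none
  else
    none

-- ===== PORT B =====
-- B (Source B): spec table kind -> (exact names, substring tiers); every tag gets one numeric
-- priority rank and ONE pass over available_tags keeps the argmin of (rank, index).
def pvSpecs : PySem.Dict String (List String × List (List String)) :=
  PySem.Dict.ofList
    [ ("critic_loss", (["train/critic_loss", "critic_loss", "loss/critic"], [["critic_loss"], ["critic", "loss"]]))
    , ("entropy", (["train/entropy", "entropy"], [["entropy"]]))
    , ("reward", (["reward/episode_mean", "rollout/ep_rew_mean", "episode_reward_mean"], [["rew", "mean"]]))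
    , ("ent_coef", (["train/ent_coef", "ent_coef"], [["ent_coef"]]))
    , ("actor_loss", (["train/actor_loss", "actor_loss", "loss/actor"], [["actor", "loss"]])) ]

def pvHit (subs : List String) (low : String) : Bool := subs.all (fun s => PySem.Str.isIn s low)

-- _rank: the two 'for j, … return' loops are List.findIdx? (first index satisfying the test)
def pvRank (exacts : List String) (tiers : List (List String)) (t : String) : Option Nat :=
  match exacts.findIdx? (fun e => t == e) with
  | some j => some j
  | none =>
    match tiers.findIdx? (fun subs => pvHit subs (PySem.Str.lower t)) with
    | some j => some (exacts.length + j)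
    | none => none

-- the body of B's single loop: keep the (rank, index, tag) minimal in lexicographic (rank, index)
def pvStep (exacts : List String) (tiers : List (List String))
    (best : Option (Nat × Int × String)) (p : Int × String) : Option (Nat × Int × String) :=
  match pvRank exacts tiers p.2 with
  | none => best
  | some r =>
    match best with
    | none => some (r, p.1, p.2)
    | some (br, bi, bt) =>
      if r < br ∨ (r = br ∧ p.1 < bi) then some (r, p.1, p.2) else some (br, bi, bt)

def choose_tag_py_alt (available_tags : List String) (kind : String) : Option String :=
  match PySem.Dict.get? pvSpecs kind with
  | none => none
  | some (exacts, tiers) =>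
    match (PySem.List.enumerate available_tags).foldl (pvStep exacts tiers) none with
    | some (_, _, t) => some t
    | none => none

-- ===== PRECONDITION & SPEC =====
def Spec_choose_tag_py (available_tags : List String) (kind : String) (out : Option String) : Prop := out = choose_tag_py_alt available_tags kind
instance (available_tags : List String) (kind : String) (out : Option String) : Decidable (Spec_choose_tag_py available_tags kind out) := by unfold Spec_choose_tag_py; infer_instance

-- ===== CLAIM (what is proved, stated in full; the proofs are below) =====
def Claim_equal_choose_tag_py : Prop := ∀ (available_tags : List String) (kind : String), Dom_choose_tag_py available_tags kind → Spec_choose_tag_py available_tags kind (choose_tag_py available_tags kind)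

-- ===== LEMMAS AND PROOFS =====

-- min of an optional rank over a list (none = no rank)
def pvCmin : Option Nat → Option Nat → Option Nat
  | none, m => m
  | some r, none => some r
  | some r, some m => some (min r m)

def pvMinF (f : String → Option Nat) (ts : List String) : Option Nat :=
  ts.foldr (fun t m => pvCmin (f t) m) none

-- the common functional spec: the first tag whose rank attains the minimal rank
def pvFres (f : String → Option Nat) (ts : List String) : Option String :=
  match pvMinF f ts with
  | none => none
  | some r => ts.find? (fun t => f t == some r)

-- left-biased min by rank
def pvMerge : Option (Nat × Int × String) → Option (Nat × Int × String) → Option (Nat × Int × String)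
  | none, b => b
  | some a, none => some a
  | some a, some b => if b.1 < a.1 then some b else some a

def pvBestFrom (exacts : List String) (tiers : List (List String)) (k : Int) :
    List String → Option (Nat × Int × String)
  | [] => none
  | t :: ts =>
    match pvRank exacts tiers t with
    | none => pvBestFrom exacts tiers (k + 1) ts
    | some r => pvMerge (some (r, k, t)) (pvBestFrom exacts tiers (k + 1) ts)

-- generic A-side shape: staged per-tier scans then the exact-name probe in front
def pvTscan (tags : List String) : List (List String) → Option String
  | [] => none
  | subs :: rest =>
    match tags.find? (fun t => pvHit subs (PySem.Str.lower t)) with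
    | some t => some t
    | none => pvTscan tags rest

def pvAstage (exacts : List String) (tiers : List (List String)) (tags : List String) : Option String :=
  match exacts.find? (fun e => tags.contains e) with
  | some e => some e
  | none => pvTscan tags tiers

theorem pvMerge_none_right (a : Option (Nat × Int × String)) : pvMerge a none = a := by
  cases a <;> rfl

theorem pvMerge_assoc (a b c : Option (Nat × Int × String)) :
    pvMerge (pvMerge a b) c = pvMerge a (pvMerge b c) := by
  cases a with
  | none => rfl
  | some a =>
    cases b with
    | none => rfl
    | some b =>
      cases c with
      | none => rw [pvMerge_none_right, pvMerge_none_right]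
      | some c =>
        by_cases h1 : b.1 < a.1 <;> by_cases h2 : c.1 < b.1 <;>
          simp [pvMerge, h1, h2] <;> omega

theorem pvFold_eq_bestFrom (E : List String) (T : List (List String)) :
    ∀ (ts : List String) (k : Int) (acc : Option (Nat × Int × String)),
      (∀ x, acc = some x → x.2.1 < k) →
      (PySem.List.enumerate ts k).foldl (pvStep E T) acc = pvMerge acc (pvBestFrom E T k ts) := by
  intro ts
  induction ts with
  | nil =>
    intro k acc _
    simp [PySem.List.enumerate_nil, pvBestFrom, pvMerge_none_right]
  | cons t ts ih =>
    intro k acc hacc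
    rw [PySem.List.enumerate_cons, List.foldl_cons]
    have hstep : pvStep E T acc (k, t) = pvMerge acc ((pvRank E T t).map (fun r => (r, k, t))) := by
      cases hR : pvRank E T t with
      | none => simp [pvStep, hR, pvMerge_none_right]
      | some r =>
        cases acc with
        | none => simp [pvStep, hR, pvMerge]
        | some a =>
          obtain ⟨ar, ai, at'⟩ := a
          have hai : ai < k := hacc _ rfl
          simp only [pvStep, hR, Option.map_some, pvMerge]
          by_cases hlt : r < ar
          · rw [if_pos (Or.inl hlt), if_pos hlt]
          · rw [if_neg (by omega), if_neg hlt]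
    have hbound : ∀ x, pvStep E T acc (k, t) = some x → x.2.1 < k + 1 := by
      intro x hx
      rw [hstep] at hx
      cases hR : pvRank E T t with
      | none =>
        rw [hR] at hx
        simp only [Option.map_none] at hx
        rw [pvMerge_none_right] at hx
        exact lt_trans (hacc _ hx) (by omega)
      | some r =>
        rw [hR] at hx
        cases acc with
        | none =>
          simp only [Option.map_some, pvMerge] at hx
          injection hx with h
          rw [← h]
          show k < k + 1
          omega
        | some a =>
          obtain ⟨ar, ai, at'⟩ := a
          have hai : ai < k := hacc _ rfl
          simp only [Option.map_some, pvMerge] at hx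
          split_ifs at hx with h
          · injection hx with h2
            rw [← h2]; show k < k + 1; omega
          · injection hx with h2
            rw [← h2]; show ai < k + 1; omega
    rw [ih (k + 1) _ hbound, hstep, pvMerge_assoc]
    congr 1
    cases hR : pvRank E T t with
    | none => simp [pvBestFrom, hR, pvMerge]
    | some r => simp [pvBestFrom, hR]

theorem pvMinF_cons (f : String → Option Nat) (t : String) (ts : List String) :
    pvMinF f (t :: ts) = pvCmin (f t) (pvMinF f ts) := rfl

theorem pvMinF_none_iff (f : String → Option Nat) (ts : List String) :
    pvMinF f ts = none ↔ ∀ t ∈ ts, f t = none := by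
  induction ts with
  | nil => simp [pvMinF]
  | cons t ts ih =>
    rw [pvMinF_cons]
    cases hf : f t <;> cases hm : pvMinF f ts <;>
      simp_all [pvCmin]

theorem pvMinF_mem (f : String → Option Nat) :
    ∀ (ts : List String) (r : Nat), pvMinF f ts = some r → ∃ t ∈ ts, f t = some r := by
  intro ts
  induction ts with
  | nil => intro r h; simp [pvMinF] at h
  | cons t ts ih =>
    intro r h
    rw [pvMinF_cons] at h
    cases hf : f t <;> cases hm : pvMinF f ts <;> rw [hf, hm] at h <;> simp [pvCmin] at h
    · obtain ⟨t', ht', hft'⟩ := ih r (by rw [hm, h])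
      exact ⟨t', List.mem_cons_of_mem _ ht', hft'⟩
    · exact ⟨t, List.mem_cons_self, by rw [hf, h]⟩
    · rename_i r0 m
      by_cases hc : r0 ≤ m
      · refine ⟨t, List.mem_cons_self, ?_⟩
        rw [hf]; congr 1; omega
      · obtain ⟨t', ht', hft'⟩ := ih m hm
        refine ⟨t', List.mem_cons_of_mem _ ht', ?_⟩
        rw [hft']; congr 1; omega

theorem pvMinF_le (f : String → Option Nat) :
    ∀ (ts : List String) (t : String) (r : Nat), t ∈ ts → f t = some r →
      ∃ m, pvMinF f ts = some m ∧ m ≤ r := by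
  intro ts
  induction ts with
  | nil => intro t r h; simp at h
  | cons a ts ih =>
    intro t r ht hft
    rw [pvMinF_cons]
    rcases List.mem_cons.mp ht with h | h
    · subst h
      rw [hft]
      cases hm : pvMinF f ts with
      | none => exact ⟨r, rfl, le_refl r⟩
      | some m => exact ⟨min r m, rfl, Nat.min_le_left _ _⟩
    · obtain ⟨m, hm, hle⟩ := ih t r h hft
      rw [hm]
      cases hf : f a with
      | none => exact ⟨m, rfl, hle⟩
      | some ra => exact ⟨min ra m, rfl, le_trans (Nat.min_le_right _ _) hle⟩

theorem pvMinF_eq (f : String → Option Nat) (ts : List String) (r : Nat)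
    (hex : ∃ t ∈ ts, f t = some r) (hlb : ∀ t ∈ ts, ∀ r', f t = some r' → r ≤ r') :
    pvMinF f ts = some r := by
  obtain ⟨t0, ht0, hft0⟩ := hex
  obtain ⟨m, hm, hle⟩ := pvMinF_le f ts t0 r ht0 hft0
  obtain ⟨t1, ht1, hft1⟩ := pvMinF_mem f ts m hm
  have := hlb t1 ht1 m hft1
  rw [hm]
  congr 1
  omega

theorem pvFind_isSome_of_minF (f : String → Option Nat) (ts : List String) (r : Nat)
    (h : pvMinF f ts = some r) : ∃ t0, ts.find? (fun t => f t == some r) = some t0 := by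
  obtain ⟨t', ht', hft'⟩ := pvMinF_mem f ts r h
  have : (ts.find? (fun t => f t == some r)).isSome := by
    rw [List.find?_isSome]
    exact ⟨t', ht', by rw [hft']; simp⟩
  exact Option.isSome_iff_exists.mp this

theorem pvBest_char (E : List String) (T : List (List String)) :
    ∀ (ts : List String) (k : Int),
      (pvBestFrom E T k ts).map (fun x => (x.1, x.2.2)) =
        match pvMinF (pvRank E T) ts with
        | none => none
        | some r => (ts.find? (fun t => pvRank E T t == some r)).map (fun t => (r, t)) := by
  intro ts
  induction ts with
  | nil => intro k; simp [pvBestFrom, pvMinF]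
  | cons t ts ih =>
    intro k
    rw [pvMinF_cons]
    cases hR : pvRank E T t with
    | none =>
      have hbf : pvBestFrom E T k (t :: ts) = pvBestFrom E T (k + 1) ts := by
        simp [pvBestFrom, hR]
      rw [hbf, ih (k + 1), pvCmin]
      cases hm : pvMinF (pvRank E T) ts with
      | none => rfl
      | some r =>
        dsimp only
        rw [List.find?_cons_of_neg (by simp [hR])]
    | some r0 =>
      have hbf : pvBestFrom E T k (t :: ts) =
          pvMerge (some (r0, k, t)) (pvBestFrom E T (k + 1) ts) := by
        simp [pvBestFrom, hR]
      rw [hbf]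
      cases hb : pvBestFrom E T (k + 1) ts with
      | none =>
        have hih := ih (k + 1)
        rw [hb] at hih
        simp only [Option.map_none] at hih
        have hmn : pvMinF (pvRank E T) ts = none := by
          cases hm : pvMinF (pvRank E T) ts with
          | none => rfl
          | some rm =>
            rw [hm] at hih
            dsimp only at hih
            obtain ⟨t0, hf0⟩ := pvFind_isSome_of_minF _ ts rm hm
            rw [hf0] at hih
            simp at hih
        rw [hmn, pvCmin, pvMerge_none_right]
        dsimp only
        rw [List.find?_cons_of_pos (by simp [hR])]
        rfl
      | some b =>
        obtain ⟨br, bi, bt⟩ := b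
        have hih := ih (k + 1)
        rw [hb] at hih
        simp only [Option.map_some] at hih
        cases hm : pvMinF (pvRank E T) ts with
        | none => rw [hm] at hih; simp at hih
        | some rm =>
          rw [hm] at hih
          dsimp only at hih
          cases hf : ts.find? (fun t => pvRank E T t == some rm) with
          | none => rw [hf] at hih; simp at hih
          | some ft =>
            rw [hf] at hih
            simp only [Option.map_some, Option.some.injEq, Prod.mk.injEq] at hih
            obtain ⟨hrm, hbt⟩ := hih
            subst hrm
            subst hbt
            rw [pvCmin]
            by_cases hbr : br < r0
            · have hmin : min r0 br = br := by omega
              rw [hmin]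
              have : pvMerge (some (r0, k, t)) (some (br, bi, bt)) = some (br, bi, bt) := by
                simp [pvMerge, hbr]
              rw [this]
              dsimp only
              rw [List.find?_cons_of_neg (by simp [hR]; omega)]
              rw [hf]
              rfl
            · have hmin : min r0 br = r0 := by omega
              rw [hmin]
              have : pvMerge (some (r0, k, t)) (some (br, bi, bt)) = some (r0, k, t) := by
                simp [pvMerge, hbr]
              rw [this]
              dsimp only
              rw [List.find?_cons_of_pos (by simp [hR])]
              rfl

-- B's loop body equals the functional spec
theorem pvB_eq_fres (E : List String) (T : List (List String)) (tags : List String) :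
    (match (PySem.List.enumerate tags).foldl (pvStep E T) none with
     | some (_, _, t) => some t
     | none => none) = pvFres (pvRank E T) tags := by
  have h0 : (PySem.List.enumerate tags).foldl (pvStep E T) none = pvBestFrom E T 0 tags := by
    rw [pvFold_eq_bestFrom E T tags 0 none (by intro x hx; cases hx)]
    rfl
  rw [h0]
  have hc := pvBest_char E T tags 0
  unfold pvFres
  cases hb : pvBestFrom E T 0 tags with
  | none =>
    rw [hb] at hc
    simp only [Option.map_none] at hc
    cases hm : pvMinF (pvRank E T) tags with
    | none => rfl
    | some r =>
      rw [hm] at hc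
      dsimp only at hc
      obtain ⟨t0, hf0⟩ := pvFind_isSome_of_minF _ tags r hm
      rw [hf0] at hc
      simp at hc
  | some b =>
    obtain ⟨br, bi, bt⟩ := b
    rw [hb] at hc
    simp only [Option.map_some] at hc
    cases hm : pvMinF (pvRank E T) tags with
    | none => rw [hm] at hc; simp at hc
    | some r =>
      rw [hm] at hc
      dsimp only at hc
      cases hf : tags.find? (fun t => pvRank E T t == some r) with
      | none => rw [hf] at hc; simp at hc
      | some ft =>
        rw [hf] at hc
        simp only [Option.map_some, Option.some.injEq, Prod.mk.injEq] at hc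
        dsimp only
        rw [hc.2, hf]

theorem pvFind_congr_mem {α : Type} (p q : α → Bool) (ts : List α)
    (h : ∀ t ∈ ts, p t = q t) : ts.find? p = ts.find? q := by
  induction ts with
  | nil => rfl
  | cons a ts ih =>
    rw [List.find?_cons, List.find?_cons, h a List.mem_cons_self,
      ih (fun t ht => h t (List.mem_cons_of_mem _ ht))]

theorem pvMinF_congr (f g : String → Option Nat) (ts : List String)
    (h : ∀ t ∈ ts, f t = g t) : pvMinF f ts = pvMinF g ts := by
  induction ts with
  | nil => rfl
  | cons a ts ih =>
    rw [pvMinF_cons, pvMinF_cons, h a List.mem_cons_self,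
      ih (fun t ht => h t (List.mem_cons_of_mem _ ht))]

theorem pvFres_congr (f g : String → Option Nat) (ts : List String)
    (h : ∀ t ∈ ts, f t = g t) : pvFres f ts = pvFres g ts := by
  unfold pvFres
  rw [pvMinF_congr f g ts h]
  cases pvMinF g ts with
  | none => rfl
  | some r =>
    exact pvFind_congr_mem _ _ ts (fun t ht => by rw [h t ht])

theorem pvFind_self (tags : List String) (e : String) (he : e ∈ tags) :
    tags.find? (fun t => t == e) = some e := by
  induction tags with
  | nil => simp at he
  | cons a ts ih =>
    by_cases h : a = e
    · subst h; rw [List.find?_cons_of_pos (by simp)]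
    · rw [List.find?_cons_of_neg (by simp [h])]
      exact ih (by rcases List.mem_cons.mp he with h' | h' <;> [exact absurd h'.symm h; exact h'])

-- tier scans = the functional spec of the shifted first-matching-tier rank
theorem pvTscan_eq_fres (tags : List String) :
    ∀ (T : List (List String)) (c : Nat),
      pvTscan tags T =
        pvFres (fun t => (T.findIdx? (fun subs => pvHit subs (PySem.Str.lower t))).map (c + ·)) tags := by
  intro T
  induction T with
  | nil =>
    intro c
    unfold pvFres
    rw [(pvMinF_none_iff _ tags).mpr (by intro t _; simp)]
    rfl
  | cons subs rest ih =>
    intro c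
    have hts : pvTscan tags (subs :: rest) =
        (match tags.find? (fun t => pvHit subs (PySem.Str.lower t)) with
         | some t => some t
         | none => pvTscan tags rest) := rfl
    rw [hts]
    cases hf : tags.find? (fun t => pvHit subs (PySem.Str.lower t)) with
    | some t0 =>
      have ht0 : t0 ∈ tags := List.mem_of_find?_eq_some hf
      have hp0 : pvHit subs (PySem.Str.lower t0) = true := by
        have := List.find?_some hf
        exact this
      have hg0 : ((subs :: rest).findIdx? (fun ss => pvHit ss (PySem.Str.lower t0))).map (c + ·) = some c := by
        rw [List.findIdx?_cons, if_pos hp0]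
        simp
      have hmin : pvMinF (fun t => ((subs :: rest).findIdx? (fun ss => pvHit ss (PySem.Str.lower t))).map (c + ·)) tags = some c := by
        apply pvMinF_eq _ _ _ ⟨t0, ht0, hg0⟩
        intro t _ r' hr'
        cases hfi : (subs :: rest).findIdx? (fun ss => pvHit ss (PySem.Str.lower t)) with
        | none => rw [hfi] at hr'; simp at hr'
        | some j => rw [hfi] at hr'; simp at hr'; omega
      unfold pvFres
      rw [hmin]
      have hpred : (fun t => (((subs :: rest).findIdx? (fun ss => pvHit ss (PySem.Str.lower t))).map (c + ·) == some c)) =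
          (fun t => pvHit subs (PySem.Str.lower t)) := by
        funext t
        rw [List.findIdx?_cons]
        cases hp : pvHit subs (PySem.Str.lower t) with
        | true => simp
        | false =>
          rw [if_neg (by simp)]
          cases rest.findIdx? (fun ss => pvHit ss (PySem.Str.lower t)) with
          | none => simp
          | some j => simp
      dsimp only
      rw [hpred, hf]
    | none =>
      have hnone := List.find?_eq_none.mp hf
      rw [ih (c + 1)]
      apply pvFres_congr
      intro t ht
      rw [List.findIdx?_cons, if_neg (by simp [hnone t ht])]
      cases rest.findIdx? (fun ss => pvHit ss (PySem.Str.lower t)) with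
      | none => rfl
      | some j => simp; omega

theorem pv_contains_ofList (xs : List String) (y : String) :
    PySem.Set.contains (PySem.Set.ofList xs) y = xs.contains y := by
  simp [pysem]

-- the main generic equivalence: A's staged search = the common functional spec
theorem pvMain (E : List String) (T : List (List String)) (tags : List String)
    (hnd : E.Nodup) : pvAstage E T tags = pvFres (pvRank E T) tags := by
  unfold pvAstage
  cases hF : E.find? (fun e => tags.contains e) with
  | some e =>
    obtain ⟨hce, as, bs, hE, has⟩ := List.find?_eq_some_iff_append.mp hF
    subst hE
    have he_mem : e ∈ tags := by simpa using hce
    have hnotas : ∀ a ∈ as, a ∉ tags := by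
      intro a ha
      have := has a ha
      simpa using this
    have hnd' : (as ++ e :: bs).Nodup := hnd
    have henotas : e ∉ as := by
      intro hmem
      exact (List.disjoint_of_nodup_append hnd') hmem List.mem_cons_self
    have hre : pvRank (as ++ e :: bs) T e = some as.length := by
      unfold pvRank
      have hidx : (as ++ e :: bs).findIdx? (fun x => e == x) = some as.length := by
        rw [List.findIdx?_append]
        rw [(List.findIdx?_eq_none_iff).mpr (by
          intro x hx
          rw [beq_eq_false_iff_ne]
          exact fun hxe => henotas (hxe ▸ hx))]
        rw [List.findIdx?_cons, if_pos (by simp)]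
        simp
      rw [hidx]
    have hlenE : (as ++ e :: bs).length = as.length + 1 + bs.length := by
      rw [List.length_append, List.length_cons]; omega
    have hlb : ∀ t ∈ tags, ∀ r', pvRank (as ++ e :: bs) T t = some r' → as.length ≤ r' := by
      intro t ht r' hr'
      unfold pvRank at hr'
      cases hfi : (as ++ e :: bs).findIdx? (fun x => t == x) with
      | some j =>
        rw [hfi] at hr'
        dsimp only at hr'
        injection hr' with hj
        subst hj
        obtain ⟨hjl, hpj⟩ := (List.findIdx?_eq_some_iff_getElem.mp hfi).imp (fun _ h => h.1)
        by_contra hlt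
        have hjas : j < as.length := by omega
        have htE : t = (as ++ e :: bs)[j] := by simpa using hpj
        have hgeq : (as ++ e :: bs)[j] = as[j]'hjas := List.getElem_append_left hjas
        have htas : t ∈ as := by rw [htE, hgeq]; exact List.getElem_mem hjas
        exact hnotas _ htas ht
      | none =>
        rw [hfi] at hr'
        dsimp only at hr'
        cases hti : T.findIdx? (fun subs => pvHit subs (PySem.Str.lower t)) with
        | none => rw [hti] at hr'; simp at hr'
        | some j =>
          rw [hti] at hr'
          dsimp only at hr'
          injection hr' with hj
          omega
    have hmin : pvMinF (pvRank (as ++ e :: bs) T) tags = some as.length :=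
      pvMinF_eq _ _ _ ⟨e, he_mem, hre⟩ hlb
    have hEr0 : (as ++ e :: bs)[as.length]'(by omega) = e := by
      rw [List.getElem_append_right (le_refl _)]
      simp
    have hpred : ∀ t, (pvRank (as ++ e :: bs) T t == some as.length) = (t == e) := by
      intro t
      cases hte : t == e with
      | true =>
        have : t = e := by simpa using hte
        subst this
        rw [hre]
        simp
      | false =>
        have htne : t ≠ e := by simpa using hte
        cases hrt : pvRank (as ++ e :: bs) T t with
        | none => simp
        | some r =>
          by_cases hr0 : r = as.length
          · subst hr0
            exfalso
            unfold pvRank at hrt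
            cases hfi : (as ++ e :: bs).findIdx? (fun x => t == x) with
            | some j =>
              rw [hfi] at hrt
              dsimp only at hrt
              injection hrt with hj
              subst hj
              obtain ⟨hjl, hpj⟩ := (List.findIdx?_eq_some_iff_getElem.mp hfi).imp (fun _ h => h.1)
              have : t = (as ++ e :: bs)[as.length]'hjl := by simpa using hpj
              exact htne (this.trans hEr0)
            | none =>
              rw [hfi] at hrt
              dsimp only at hrt
              cases hti : T.findIdx? (fun subs => pvHit subs (PySem.Str.lower t)) with
              | none => rw [hti] at hrt; simp at hrt
              | some j =>
                rw [hti] at hrt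
                dsimp only at hrt
                injection hrt with hj
                omega
          · simp [hr0]
    unfold pvFres
    rw [hmin]
    dsimp only
    rw [show (fun t => pvRank (as ++ e :: bs) T t == some as.length) = (fun t => t == e) from funext hpred]
    rw [pvFind_self tags e he_mem]
  | none =>
    have hnone := List.find?_eq_none.mp hF
    have hmem : ∀ t ∈ tags,
        pvRank E T t = (T.findIdx? (fun subs => pvHit subs (PySem.Str.lower t))).map (E.length + ·) := by
      intro t ht
      unfold pvRank
      have hidx : E.findIdx? (fun x => t == x) = none := by
        rw [List.findIdx?_eq_none_iff]
        intro x hx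
        rw [beq_eq_false_iff_ne]
        intro hxe
        subst hxe
        exact absurd (by simpa using ht : tags.contains t = true) (hnone t hx)
      rw [hidx]
      cases T.findIdx? (fun subs => pvHit subs (PySem.Str.lower t)) with
      | none => rfl
      | some j => rfl
    rw [pvTscan_eq_fres tags T E.length]
    exact pvFres_congr _ _ tags (fun t ht => (hmem t ht).symm)

-- the combined generic fact, cited once per kind
theorem pvKind (E : List String) (T : List (List String)) (tags : List String)
    (hnd : E.Nodup) :
    pvAstage E T tags =
      (match (PySem.List.enumerate tags).foldl (pvStep E T) none with
       | some (_, _, t) => some t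
       | none => none) := by
  rw [pvB_eq_fres, ← pvMain E T tags hnd]

-- ===== VERDICT (by name: the statement is the Claim_ definition above) =====
-- one kind, generic endgame: A's literal branch rewritten to pvAstage, then pvKind
theorem pvKindCase (tags : List String) (E : List String) (T : List (List String))
    (hnd : E.Nodup) (abranch : Option String)
    (hA : abranch = pvAstage E T tags) :
    abranch =
      (match (PySem.List.enumerate tags).foldl (pvStep E T) none with
       | some (_, _, t) => some t
       | none => none) := by
  rw [hA, pvKind E T tags hnd]

theorem choose_tag_py_spec : Claim_equal_choose_tag_py := by
  intro tags kind _
  unfold Spec_choose_tag_py choose_tag_py choose_tag_py_alt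
  have hcont : (fun t => PySem.Set.contains (PySem.Set.ofList tags) t) = (fun e => tags.contains e) :=
    funext (fun t => pv_contains_ofList tags t)
  by_cases h1 : kind = "critic_loss"
  · subst h1
    rw [show PySem.Dict.get? pvSpecs "critic_loss"
        = some (["train/critic_loss", "critic_loss", "loss/critic"], [["critic_loss"], ["critic", "loss"]]) from rfl]
    dsimp only
    rw [if_pos (by decide)]
    refine pvKindCase tags _ _ (by decide) _ ?_
    unfold pvAstage pvTscan
    rw [hcont,
      show (fun t => PySem.Str.isIn "critic_loss" (PySem.Str.lower t))
        = (fun t => pvHit ["critic_loss"] (PySem.Str.lower t)) from funext (fun t => by simp [pvHit]),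
      show (fun t =>
          let low := PySem.Str.lower t
          PySem.Str.isIn "critic" low && PySem.Str.isIn "loss" low)
        = (fun t => pvHit ["critic", "loss"] (PySem.Str.lower t)) from funext (fun t => by simp [pvHit])]
    rfl
  · by_cases h2 : kind = "entropy"
    · subst h2
      rw [show PySem.Dict.get? pvSpecs "entropy"
          = some (["train/entropy", "entropy"], [["entropy"]]) from rfl]
      dsimp only
      rw [if_neg (by decide), if_pos (by decide)]
      refine pvKindCase tags _ _ (by decide) _ ?_
      unfold pvAstage pvTscan
      rw [hcont,
        show (fun t =>
            let low := PySem.Str.lower t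
            PySem.Str.isIn "entropy" low)
          = (fun t => pvHit ["entropy"] (PySem.Str.lower t)) from funext (fun t => by simp [pvHit])]
      rfl
    · by_cases h3 : kind = "reward"
      · subst h3
        rw [show PySem.Dict.get? pvSpecs "reward"
            = some (["reward/episode_mean", "rollout/ep_rew_mean", "episode_reward_mean"], [["rew", "mean"]]) from rfl]
        dsimp only
        rw [if_neg (by decide), if_neg (by decide), if_pos (by decide)]
        refine pvKindCase tags _ _ (by decide) _ ?_
        unfold pvAstage pvTscan
        rw [hcont,
          show (fun t =>
              let low := PySem.Str.lower t
              PySem.Str.isIn "rew" low && PySem.Str.isIn "mean" low)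
            = (fun t => pvHit ["rew", "mean"] (PySem.Str.lower t)) from funext (fun t => by simp [pvHit])]
        rfl
      · by_cases h4 : kind = "ent_coef"
        · subst h4
          rw [show PySem.Dict.get? pvSpecs "ent_coef"
              = some (["train/ent_coef", "ent_coef"], [["ent_coef"]]) from rfl]
          dsimp only
          rw [if_neg (by decide), if_neg (by decide), if_neg (by decide), if_pos (by decide)]
          refine pvKindCase tags _ _ (by decide) _ ?_
          unfold pvAstage pvTscan
          rw [hcont,
            show (fun t => PySem.Str.isIn "ent_coef" (PySem.Str.lower t))
              = (fun t => pvHit ["ent_coef"] (PySem.Str.lower t)) from funext (fun t => by simp [pvHit])]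
          rfl
        · by_cases h5 : kind = "actor_loss"
          · subst h5
            rw [show PySem.Dict.get? pvSpecs "actor_loss"
                = some (["train/actor_loss", "actor_loss", "loss/actor"], [["actor", "loss"]]) from rfl]
            dsimp only
            rw [if_neg (by decide), if_neg (by decide), if_neg (by decide), if_neg (by decide), if_pos (by decide)]
            refine pvKindCase tags _ _ (by decide) _ ?_
            unfold pvAstage pvTscan
            rw [hcont,
              show (fun t =>
                  let low := PySem.Str.lower t
                  PySem.Str.isIn "actor" low && PySem.Str.isIn "loss" low)
                = (fun t => pvHit ["actor", "loss"] (PySem.Str.lower t)) from funext (fun t => by simp [pvHit])]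
            rfl
          · have ht : PySem.Dict.get? pvSpecs kind = none := by
              simp [pvSpecs, PySem.Dict.ofList, PySem.Dict.update, PySem.Dict.get?, PySem.Dict.empty,
                PySem.Dict.insert, Ne.symm h1, Ne.symm h2, Ne.symm h3, Ne.symm h4, Ne.symm h5, List.foldl]
            rw [ht]
            rw [if_neg (by simp [h1]), if_neg (by simp [h2]), if_neg (by simp [h3]),
              if_neg (by simp [h4]), if_neg (by simp [h5])]
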